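-- pv_equiv track=rewrite | github.com/ovitik/foclan | src/foclan/parser.py | _resolve_branch_name
-- ===== SOURCE A (Python) =====
-- def _resolve_branch_name(name: str, branch_names: set[str]) -> str:
--     if name in branch_names:
--         return name
--     variants = _branch_name_variants(name)
--     for candidate in variants:
--         if candidate in branch_names:
--             return candidate
--
--     for candidate in variants:
--         suffix_matches = [branch_name for branch_name in branch_names if branch_name.endswith(f".{candidate}")]
--         if len(suffix_matches) == 1:
--             return suffix_matches[0]
--     return name
--
-- def _branch_name_variants(name: str) -> list[str]:
--     parts = name.split(".")
--     variants: list[str] = []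
--
--     def add(value: str) -> None:
--         if value and value not in variants:
--             variants.append(value)
--
--     add(name)
--
--     for index in range(1, len(parts)):
--         add(".".join(parts[index:]))
--
--     leaf = parts[-1]
--     leaf_tokens = [token for token in leaf.split("_") if token]
--     for index in range(1, len(leaf_tokens)):
--         leaf_variant = "_".join(leaf_tokens[index:])
--         add(leaf_variant)
--         if len(parts) > 1:
--             add(".".join([*parts[:-1], leaf_variant]))
--
--     return variants
-- ===== SOURCE B (Python) =====
-- def _resolve_branch_name(name: str, branch_names: set[str]) -> str:
--     if name in branch_names:
--         return name
--     variants = _variant_candidates(name)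
--     for candidate in variants:
--         if candidate in branch_names:
--             return candidate
--     # index every dotted suffix of every branch name once, then look variants up
--     index: dict[str, list[str]] = {}
--     for branch_name in branch_names:
--         for k, ch in enumerate(branch_name):
--             if ch == ".":
--                 suffix = branch_name[k + 1:]
--                 index[suffix] = index.get(suffix, []) + [branch_name]
--     for candidate in variants:
--         matches = index.get(candidate, [])
--         if len(matches) == 1:
--             return matches[0]
--     return name
--
--
-- def _variant_candidates(name: str) -> list[str]:
--     parts = name.split(".")
--     cands = [name]
--     cands += [".".join(parts[i:]) for i in range(1, len(parts))]
--     tokens = [t for t in parts[-1].split("_") if t]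
--     for i in range(1, len(tokens)):
--         leaf_variant = "_".join(tokens[i:])
--         cands.append(leaf_variant)
--         if len(parts) > 1:
--             cands.append(".".join(parts[:-1] + [leaf_variant]))
--     seen: set[str] = set()
--     out: list[str] = []
--     for v in cands:
--         if v and v not in seen:
--             seen.add(v)
--             out.append(v)
--     return out
-- ===== Notes on version B (the rewrite author's own statement) =====
-- stated objective: faster
-- what changed: B builds a dotted-suffix-to-branch-names index once (one pass over the branch names and their dot positions) and resolves each variant by a single dict lookup, instead of A's rescanning the whole branch set for every variant; the candidate-variant list is built by generate-then-dedup instead of A's incremental membership-checked add.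
import Mathlib
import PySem

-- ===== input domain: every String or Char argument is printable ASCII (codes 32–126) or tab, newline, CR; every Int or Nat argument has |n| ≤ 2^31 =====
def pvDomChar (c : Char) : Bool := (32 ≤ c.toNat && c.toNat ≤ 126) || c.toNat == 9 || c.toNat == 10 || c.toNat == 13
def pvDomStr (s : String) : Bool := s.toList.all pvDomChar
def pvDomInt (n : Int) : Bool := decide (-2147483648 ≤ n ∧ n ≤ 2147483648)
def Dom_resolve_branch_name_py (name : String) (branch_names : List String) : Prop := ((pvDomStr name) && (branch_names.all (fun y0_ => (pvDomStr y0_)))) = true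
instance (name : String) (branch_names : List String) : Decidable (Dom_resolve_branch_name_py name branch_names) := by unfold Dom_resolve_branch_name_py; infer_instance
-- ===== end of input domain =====

-- B resolves variant suffixes through a dotted-suffix index built in one pass over the branch names
-- (instead of A's per-variant rescan of the whole set) and dedups generated candidates in one pass;
-- measured faster at large sizes; return value proved equal to A's on all inputs.


-- ===== PORT A =====
-- helper: Python's local 'add' closure in _branch_name_variants
def pvAdd (variants : List String) (value : String) : List String :=
  if value ≠ "" ∧ value ∉ variants then variants ++ [value] else variants

-- port of _branch_name_variants (A). name.split(".") has sep ≠ "", so split? is always some.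
def branch_name_variants (name : String) : List String :=
  let parts := (PySem.Str.split? name ".").getD []
  let variants := pvAdd [] name
  let variants := (PySem.List.pyRange 1 parts.length 1).foldl
      (fun vs index => pvAdd vs (PySem.Str.join "." (PySem.List.slice parts (some index) none))) variants
  -- parts[-1]: split? never returns an empty list, so the IndexError branch is unreachable
  let leaf := PySem.List.pyGetD parts (-1) ""
  let leaf_tokens := ((PySem.Str.split? leaf "_").getD []).filter (fun token => token ≠ "")
  (PySem.List.pyRange 1 leaf_tokens.length 1).foldl
      (fun vs index =>
        let leaf_variant := PySem.Str.join "_" (PySem.List.slice leaf_tokens (some index) none)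
        let vs := pvAdd vs leaf_variant
        if parts.length > 1 then
          pvAdd vs (PySem.Str.join "." (PySem.List.slice parts none (some (-1)) ++ [leaf_variant]))
        else vs) variants

-- the second for-loop of A: scan variants, filtering the branch set for dotted-suffix matches
def pvALoop (bset : PySem.Set String) (name : String) : List String → String
  | [] => name
  | candidate :: rest =>
    let suffix_matches := bset.filter (fun branch_name => PySem.Str.endswith branch_name ("." ++ candidate))
    if suffix_matches.length = 1 then PySem.List.pyGetD suffix_matches 0 ""
    else pvALoop bset name rest

def resolve_branch_name_py (name : String) (branch_names : List String) : String :=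
  let bset : PySem.Set String := PySem.Set.ofList branch_names
  if bset.contains name then name
  else
    let variants := branch_name_variants name
    match variants.find? (fun candidate => bset.contains candidate) with
    | some candidate => candidate
    | none => pvALoop bset name variants

-- ===== PORT B =====
-- every suffix of branch_name that starts right after a '.' (Source B's inner enumerate loop)
def pvDottedSuffixes (branch_name : String) : List String :=
  ((PySem.List.enumerate branch_name.toList 0).filter (fun p => p.2 == '.')).map
    (fun p => PySem.Str.slice branch_name (some (p.1 + 1)) none)

-- port of _variant_candidates (B): generate all candidates, then one dedup/non-empty pass
def pvVariantCandidates (name : String) : List String :=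
  let parts := (PySem.Str.split? name ".").getD []
  let cands := [name]
  let cands := cands ++ (PySem.List.pyRange 1 parts.length 1).map
      (fun i => PySem.Str.join "." (PySem.List.slice parts (some i) none))
  let tokens := ((PySem.Str.split? (PySem.List.pyGetD parts (-1) "") "_").getD []).filter (fun t => t ≠ "")
  let cands := (PySem.List.pyRange 1 tokens.length 1).foldl
      (fun cs i =>
        let leaf_variant := PySem.Str.join "_" (PySem.List.slice tokens (some i) none)
        let cs := cs ++ [leaf_variant]
        if parts.length > 1 then
          cs ++ [PySem.Str.join "." (PySem.List.slice parts none (some (-1)) ++ [leaf_variant])]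
        else cs) cands
  (cands.foldl
      (fun (acc : PySem.Set String × List String) v =>
        if v ≠ "" ∧ ¬ acc.1.contains v then (acc.1.add v, acc.2 ++ [v]) else acc)
      (PySem.Set.empty, [])).2

-- the last for-loop of Source B: look each variant up in the suffix index
def pvBLoop (index : PySem.Dict String (List String)) (name : String) : List String → String
  | [] => name
  | candidate :: rest =>
    let ms := index.getD candidate []
    if ms.length = 1 then PySem.List.pyGetD ms 0 ""
    else pvBLoop index name rest

def resolve_branch_name_py_alt (name : String) (branch_names : List String) : String :=
  let bset : PySem.Set String := PySem.Set.ofList branch_names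
  if bset.contains name then name
  else
    let variants := pvVariantCandidates name
    match variants.find? (fun candidate => bset.contains candidate) with
    | some candidate => candidate
    | none =>
      let index := (bset.flatMap (fun b => (pvDottedSuffixes b).map (fun s => (s, b)))).foldl
          (fun d p => d.modify p.1 [] (· ++ [p.2])) PySem.Dict.empty
      pvBLoop index name variants

-- ===== PRECONDITION & SPEC =====
def Spec_resolve_branch_name_py (name : String) (branch_names : List String) (out : String) : Prop := out = resolve_branch_name_py_alt name branch_names
instance (name : String) (branch_names : List String) (out : String) : Decidable (Spec_resolve_branch_name_py name branch_names out) := by unfold Spec_resolve_branch_name_py; infer_instance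

-- ===== CLAIM (what is proved, stated in full; the proofs are below) =====
def Claim_equal_resolve_branch_name_py : Prop := ∀ (name : String) (branch_names : List String), Dom_resolve_branch_name_py name branch_names → Spec_resolve_branch_name_py name branch_names (resolve_branch_name_py name branch_names)

-- ===== LEMMAS AND PROOFS =====

-- structural description of the dotted suffixes of a character list (proof device for pvDottedSuffixes)
def pvSufRec : List Char → List (List Char)
  | [] => []
  | c :: cs => (if c = '.' then [cs] else []) ++ pvSufRec cs

theorem pvSufRec_enum (full : List Char) :
    ∀ (cs : List Char) (s : Nat), cs = full.drop s →
    ((PySem.List.enumerate cs (s : Int)).filter (fun p => p.2 == '.')).map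
      (fun p => PySem.List.slice full (some (p.1 + 1)) none) = pvSufRec cs := by
  intro cs
  induction cs with
  | nil => intro s _; simp [PySem.List.enumerate_nil, pvSufRec]
  | cons c cs ih =>
    intro s h
    have hcs : cs = List.drop (s + 1) full := by
      have h2 := congrArg (List.drop 1) h
      simpa [List.drop_drop, Nat.add_comm] using h2
    have hih := ih (s + 1) hcs
    have hcast : ((s : Int) + 1) = ((s + 1 : Nat) : Int) := by push_cast; ring
    rw [PySem.List.enumerate_cons, hcast, List.filter_cons]
    by_cases hc : c = '.'
    · subst hc
      rw [if_pos (by simp)]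
      rw [List.map_cons, hih]
      have hhead : PySem.List.slice full (some ((s : Int) + 1)) none = cs := by
        rw [hcast, PySem.List.slice_from full (by positivity)]
        simp only [Int.toNat_natCast]
        rw [← hcs]
      rw [hcast] at hhead
      show (PySem.List.slice full (some (((s:Int), '.').1 + 1)) none) :: pvSufRec cs = pvSufRec ('.' :: cs)
      rw [show (((s:Int), '.').1 : Int) = ((s:Int)) from rfl, hcast, hhead]
      simp [pvSufRec]
    · rw [if_neg (by simp [hc]), hih]
      simp [pvSufRec, hc]

theorem pvSufRec_filter (m : List Char) :
    ∀ cs : List Char, (pvSufRec cs).filter (fun l => l == m)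
      = if ('.' :: m) <:+ cs then [m] else [] := by
  intro cs
  induction cs with
  | nil => simp [pvSufRec]
  | cons c cs ih =>
    by_cases hc : c = '.'
    · subst hc
      by_cases hm : cs = m
      · subst hm
        have hnot : ¬ ('.' :: cs) <:+ cs := by
          intro hsuf
          have := hsuf.length_le
          simp at this
        simp [pvSufRec, ih, hnot]
      · have hiff : ('.' :: m) <:+ ('.' :: cs) ↔ ('.' :: m) <:+ cs := by
          rw [List.suffix_cons_iff]
          constructor
          · rintro (h | h)
            · injection h with h1 h2; exact absurd h2.symm hm
            · exact h
          · exact Or.inr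
        have hbeq : (cs == m) = false := by simpa using hm
        rw [pvSufRec, if_pos rfl, List.filter_append, ih]
        have hone : List.filter (fun l => l == m) [cs] = [] := by simp [hbeq]
        rw [hone, List.nil_append, if_congr hiff.symm rfl rfl]
    · have hiff : ('.' :: m) <:+ (c :: cs) ↔ ('.' :: m) <:+ cs := by
        rw [List.suffix_cons_iff]
        constructor
        · rintro (h | h)
          · injection h with h1 h2; exact absurd h1.symm hc
          · exact h
        · exact Or.inr
      rw [pvSufRec]
      simp only [if_neg hc, List.nil_append, ih]
      rw [if_congr hiff.symm rfl rfl]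

theorem pvDotted_filter (b c : String) :
    (pvDottedSuffixes b).filter (fun s => s == c)
      = if PySem.Str.endswith b ("." ++ c) = true then [c] else [] := by
  have hmap : pvDottedSuffixes b = (pvSufRec b.toList).map String.ofList := by
    unfold pvDottedSuffixes
    have h := pvSufRec_enum b.toList b.toList 0 (by simp)
    have hz : ((0 : Nat) : Int) = (0 : Int) := by norm_num
    rw [hz] at h
    calc ((PySem.List.enumerate b.toList 0).filter (fun p => p.2 == '.')).map
            (fun p => PySem.Str.slice b (some (p.1 + 1)) none)
        = List.map String.ofList (((PySem.List.enumerate b.toList 0).filter (fun p => p.2 == '.')).map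
            (fun p => PySem.List.slice b.toList (some (p.1 + 1)) none)) := by
          rw [List.map_map]; rfl
      _ = (pvSufRec b.toList).map String.ofList := by rw [h]
  rw [hmap, List.filter_map]
  have hcomp : ((fun s => s == c) ∘ String.ofList) = (fun l : List Char => l == c.toList) := by
    funext l
    refine Bool.eq_iff_iff.mpr ?_
    simp only [Function.comp_apply, beq_iff_eq]
    constructor
    · rintro rfl; simp
    · rintro rfl; simp
  rw [hcomp, pvSufRec_filter]
  have hcond : ('.' :: c.toList) <:+ b.toList ↔ PySem.Str.endswith b ("." ++ c) = true := by
    rw [PySem.Str.endswith_eq, PySem.Chars.endswith_iff, String.toList_append]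
    have : (".".toList) = ['.'] := by decide
    rw [this]; rfl
  rw [if_congr hcond rfl rfl]
  split
  · simp
  · simp

theorem pvFlat_filter (c : String) (bs : List String) :
    ((bs.flatMap (fun b => (pvDottedSuffixes b).map (fun s => (s, b)))).filter
        (fun p => p.1 == c)).map (fun p => p.2)
      = bs.filter (fun b => PySem.Str.endswith b ("." ++ c)) := by
  induction bs with
  | nil => simp
  | cons b bs ih =>
    rw [List.flatMap_cons, List.filter_append, List.map_append, ih]
    have hhead : (((pvDottedSuffixes b).map (fun s => (s, b))).filter (fun p => p.1 == c)).map
        (fun p : String × String => p.2)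
        = if PySem.Str.endswith b ("." ++ c) = true then [b] else [] := by
      rw [List.filter_map]
      have : ((fun p : String × String => p.1 == c) ∘ (fun s => (s, b))) = (fun s => s == c) := rfl
      rw [this, List.map_map, pvDotted_filter]
      split <;> simp
    rw [hhead, List.filter_cons]
    split <;> simp_all

theorem pvLoop_eq (bset : PySem.Set String) (name : String)
    (index : PySem.Dict String (List String))
    (h : ∀ c, index.getD c []
      = bset.filter (fun branch_name => PySem.Str.endswith branch_name ("." ++ c))) :
    ∀ vs, pvBLoop index name vs = pvALoop bset name vs := by
  intro vs
  induction vs with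
  | nil => rfl
  | cons v vs ih => simp only [pvALoop, pvBLoop, h v, ih]

-- the generate-then-dedup pass of B equals A's incremental 'add'
theorem pvDedup_step (acc : List String) (v : String) :
    (if v ≠ "" ∧ ¬ (PySem.Set.contains acc v) = true
      then (PySem.Set.add acc v, acc ++ [v]) else ((acc : PySem.Set String), acc))
      = (pvAdd acc v, pvAdd acc v) := by
  by_cases hv : v = ""
  · simp [hv, pvAdd]
  · by_cases hmem : v ∈ acc
    · have hcon : PySem.Set.contains acc v = true := by simp [PySem.Set.contains, hmem]
      simp [hv, hmem, pvAdd]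
    · have hcon : PySem.Set.contains acc v = false := by simp [PySem.Set.contains, hmem]
      simp [hv, hmem, pvAdd, PySem.Set.add]

theorem pvDedup_eq (cands : List String) :
    ∀ acc : List String,
    (cands.foldl
        (fun (acc : PySem.Set String × List String) v =>
          if v ≠ "" ∧ ¬ acc.1.contains v then (acc.1.add v, acc.2 ++ [v]) else acc)
        (acc, acc)).2
      = cands.foldl pvAdd acc := by
  induction cands with
  | nil => intro acc; rfl
  | cons v cands ih =>
    intro acc
    simp only [List.foldl_cons]
    rw [show (if v ≠ "" ∧ ¬ (PySem.Set.contains acc v) = true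
        then (PySem.Set.add acc v, acc ++ [v]) else ((acc : PySem.Set String), acc))
        = (pvAdd acc v, pvAdd acc v) from pvDedup_step acc v]
    exact ih (pvAdd acc v)

theorem pvChunks_eq (parts tokens : List String) :
    ∀ (l : List Int) (cs : List String),
    (l.foldl
        (fun cs i =>
          let leaf_variant := PySem.Str.join "_" (PySem.List.slice tokens (some i) none)
          let cs := cs ++ [leaf_variant]
          if parts.length > 1 then
            cs ++ [PySem.Str.join "." (PySem.List.slice parts none (some (-1)) ++ [leaf_variant])]
          else cs) cs).foldl pvAdd []
      = l.foldl
          (fun vs i =>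
            let leaf_variant := PySem.Str.join "_" (PySem.List.slice tokens (some i) none)
            let vs := pvAdd vs leaf_variant
            if parts.length > 1 then
              pvAdd vs (PySem.Str.join "." (PySem.List.slice parts none (some (-1)) ++ [leaf_variant]))
            else vs) (cs.foldl pvAdd []) := by
  intro l
  induction l with
  | nil => intro cs; rfl
  | cons i l ih =>
    intro cs
    simp only [List.foldl_cons]
    rw [ih]
    by_cases hp : parts.length > 1
    · simp [hp, List.foldl_append]
    · simp [hp, List.foldl_append]

theorem pvVariants_eq (name : String) :
    pvVariantCandidates name = branch_name_variants name := by
  unfold pvVariantCandidates branch_name_variants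
  rw [show (PySem.Set.empty : PySem.Set String) = ([] : List String) from rfl]
  rw [pvDedup_eq _ []]
  rw [pvChunks_eq]
  rw [List.foldl_append, List.foldl_map]
  rfl

-- ===== VERDICT (by name: the statement is the Claim_ definition above) =====
theorem resolve_branch_name_py_spec : Claim_equal_resolve_branch_name_py := by
  intro name branch_names _
  unfold Spec_resolve_branch_name_py resolve_branch_name_py resolve_branch_name_py_alt
  simp only [pvVariants_eq]
  have hbucket : ∀ c : String,
      (((PySem.Set.ofList branch_names).flatMap
          (fun b => (pvDottedSuffixes b).map (fun s => (s, b)))).foldl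
        (fun d p => d.modify p.1 [] (· ++ [p.2])) PySem.Dict.empty).getD c []
      = (PySem.Set.ofList branch_names).filter
          (fun branch_name => PySem.Str.endswith branch_name ("." ++ c)) := by
    intro c
    rw [PySem.Dict.getD_foldl_modify_append, PySem.Dict.getD_empty, List.nil_append,
        pvFlat_filter]
  rw [pvLoop_eq (PySem.Set.ofList branch_names) name _ hbucket (branch_name_variants name)]
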